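-- pv_equiv track=rewrite | github.com/Collector667/compressor_RLE | SA_IS.py | counting_sort_arg
-- ===== SOURCE A (Python) =====
-- def counting_sort_arg(S):
--     N = len(S)
--     M = 256
--     T = [0 for _ in range(M)]
--     T_sub = [0 for _ in range(M)]
--     for s in S:
--         T[s] += 1
--     for j in range(1,M):
--         T_sub[j] = T_sub[j-1] + T[j-1]
--     P = [-1 for _ in range(N)]
--     P_inverse = [-1 for _ in range(N)]
--     for i in range(N):
--         P_inverse[T_sub[S[i]]] = i
--         P[i] = T_sub[S[i]]
--         T_sub[S[i]] +=1
--     return P_inverse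
-- ===== SOURCE B (Python) =====
-- def counting_sort_arg(S):
--     buckets = [[] for _ in range(256)]
--     for i in range(len(S)):
--         buckets[S[i]].append(i)
--     res = []
--     for b in buckets:
--         res.extend(b)
--     return res
-- ===== Notes on version B (the rewrite author's own statement) =====
-- stated objective: simpler
-- what changed: Replaces the count/prefix-sum/scatter pipeline (three auxiliary arrays and an inverse-permutation write loop) by a single bucket-gather pass: indices are appended to 256 value buckets and the buckets are concatenated in value order.
import Mathlib
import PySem

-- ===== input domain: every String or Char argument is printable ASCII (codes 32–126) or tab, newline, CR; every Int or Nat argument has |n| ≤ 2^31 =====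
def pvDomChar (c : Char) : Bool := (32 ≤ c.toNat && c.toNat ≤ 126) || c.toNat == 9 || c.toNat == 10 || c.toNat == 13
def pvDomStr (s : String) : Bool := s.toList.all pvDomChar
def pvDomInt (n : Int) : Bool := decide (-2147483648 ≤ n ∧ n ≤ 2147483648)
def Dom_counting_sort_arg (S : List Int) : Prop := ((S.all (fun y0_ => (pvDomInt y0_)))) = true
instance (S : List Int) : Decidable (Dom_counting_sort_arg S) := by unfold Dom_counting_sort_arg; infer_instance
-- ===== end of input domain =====

-- B replaces A's count/prefix-sum/scatter pipeline by gathering indices into 256 value buckets and concatenating them in value order; proved equal wherever A returns (all values in [-256,255]).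


-- ===== PORT A =====
def counting_sort_arg (S : List Int) : List Int :=
  let N := S.length
  let M := 256
  let T0 := (List.range M).map (fun _ => (0 : Int))
  let Tsub0 := (List.range M).map (fun _ => (0 : Int))
  let T := S.foldl (fun T s => PySem.List.pySetD T s (PySem.List.pyGetD T s 0 + 1)) T0
  let Tsub := (PySem.List.pyRange 1 (M : Int) 1).foldl
      (fun Tsub j =>
        PySem.List.pySetD Tsub j (PySem.List.pyGetD Tsub (j - 1) 0 + PySem.List.pyGetD T (j - 1) 0)) Tsub0
  let P0 := (List.range N).map (fun _ => (-1 : Int))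
  let Pinv0 := (List.range N).map (fun _ => (-1 : Int))
  let st := (PySem.List.pyRange 0 (N : Int) 1).foldl
      (fun (st : List Int × List Int × List Int) i =>
        let Pinv := st.1
        let P := st.2.1
        let Tsub := st.2.2
        let s := PySem.List.pyGetD S i 0
        let Pinv' := PySem.List.pySetD Pinv (PySem.List.pyGetD Tsub s 0) i
        let P' := PySem.List.pySetD P i (PySem.List.pyGetD Tsub s 0)
        let Tsub' := PySem.List.pySetD Tsub s (PySem.List.pyGetD Tsub s 0 + 1)
        (Pinv', P', Tsub')) (Pinv0, P0, Tsub)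
  st.1

-- ===== PORT B =====
def counting_sort_arg_alt (S : List Int) : List Int :=
  let buckets0 := (List.range 256).map (fun _ => ([] : List Int))
  let buckets := (PySem.List.pyRange 0 (S.length : Int) 1).foldl
      (fun b i =>
        let s := PySem.List.pyGetD S i 0
        PySem.List.pySetD b s (PySem.List.pyGetD b s [] ++ [i])) buckets0
  buckets.foldl (fun res bk => res ++ bk) []

-- ===== PRECONDITION & SPEC =====
-- Pre_ excludes exactly the inputs on which Python A raises IndexError: a list element outside [-256, 255].
def Pre_counting_sort_arg (S : List Int) : Prop := ∀ s ∈ S, -256 ≤ s ∧ s < 256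
instance (S : List Int) : Decidable (Pre_counting_sort_arg S) := by unfold Pre_counting_sort_arg; infer_instance
def pvWitness_counting_sort_arg : List Int := [3, -1, 255, 0, 3]

def Spec_counting_sort_arg (S : List Int) (out : List Int) : Prop := out = counting_sort_arg_alt S
instance (S : List Int) (out : List Int) : Decidable (Spec_counting_sort_arg S out) := by unfold Spec_counting_sort_arg; infer_instance

-- ===== CLAIM (what is proved, stated in full; the proofs are below) =====
def Claim_equal_counting_sort_arg : Prop := ∀ (S : List Int), Dom_counting_sort_arg S → Pre_counting_sort_arg S → Spec_counting_sort_arg S (counting_sort_arg S)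

-- ===== LEMMAS AND PROOFS =====

-- Python's index wrap for a length-256 list: the effective natural index of s ∈ [-256,255].
def pvKey (s : Int) : Nat := (if s < 0 then s + 256 else s).toNat
def pvKAt (S : List Int) (i : Nat) : Nat := pvKey (S.getD i 0)
-- number of indices i < m whose key is k
def pvCnt (S : List Int) (m k : Nat) : Nat := (List.range m).countP (fun i => pvKAt S i = k)
-- those indices, in increasing order, as Ints
def pvGrp (S : List Int) (m k : Nat) : List Int := ((List.range m).filter (fun i => pvKAt S i = k)).map (fun i : Nat => (i : Int))
-- number of indices with key < k  (= start offset of key k's segment)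
def pvOff (S : List Int) (k : Nat) : Nat := (List.range S.length).countP (fun i => pvKAt S i < k)
-- concatenation of the first m full groups
def pvBJ (S : List Int) (m : Nat) : List Int := ((List.range m).map (fun k => pvGrp S S.length k)).flatten

theorem pvKey_lt {s : Int} (h1 : -256 ≤ s) (h2 : s < 256) : pvKey s < 256 := by
  unfold pvKey; split <;> omega

theorem pvKAt_lt {S : List Int} (hPre : Pre_counting_sort_arg S) {i : Nat} (hi : i < S.length) :
    pvKAt S i < 256 := by
  have hm : S.getD i 0 ∈ S := by
    rw [List.getD_eq_getElem S 0 hi]; exact List.getElem_mem hi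
  obtain ⟨h1, h2⟩ := hPre _ hm
  exact pvKey_lt h1 h2

theorem pvSmem {S : List Int} (hPre : Pre_counting_sort_arg S) {i : Nat} (hi : i < S.length) :
    -256 ≤ S.getD i 0 ∧ S.getD i 0 < 256 := by
  have hm : S.getD i 0 ∈ S := by
    rw [List.getD_eq_getElem S 0 hi]; exact List.getElem_mem hi
  exact hPre _ hm

theorem pvGetD_set_self {α : Type} {l : List α} {i : Nat} (v d : α) (h : i < l.length) :
    (l.set i v).getD i d = v := by
  rw [List.getD_eq_getElem?_getD, List.getElem?_set_self h]; rfl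

theorem pvGetD_set_ne {α : Type} {l : List α} {i j : Nat} (v d : α) (h : i ≠ j) :
    (l.set i v).getD j d = l.getD j d := by
  rw [List.getD_eq_getElem?_getD, List.getElem?_set_ne h, ← List.getD_eq_getElem?_getD]

theorem pvGetD_append_left {α : Type} {l1 l2 : List α} {i : Nat} (d : α) (h : i < l1.length) :
    (l1 ++ l2).getD i d = l1.getD i d := by
  rw [List.getD_eq_getElem?_getD, List.getElem?_append_left h, ← List.getD_eq_getElem?_getD]

theorem pvGetD_append_right {α : Type} {l1 l2 : List α} (r : Nat) (d : α) :
    (l1 ++ l2).getD (l1.length + r) d = l2.getD r d := by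
  rw [List.getD_eq_getElem?_getD, List.getElem?_append_right (by omega)]
  rw [← List.getD_eq_getElem?_getD]; congr 1; omega

theorem pvInit_getD {α : Type} (n j : Nat) (c d : α) :
    ((List.range n).map (fun _ => c)).getD j d = if j < n then c else d := by
  rw [List.getD_eq_getElem?_getD, List.getElem?_map]
  by_cases h : j < n <;> simp [h]

-- pyGetD on a length-256 list with s ∈ [-256,255] is plain getD at the wrapped key
theorem pvGetD_key {α : Type} {xs : List α} {s : Int} (d : α) (hlen : xs.length = 256)
    (h1 : -256 ≤ s) (h2 : s < 256) : PySem.List.pyGetD xs s d = xs.getD (pvKey s) d := by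
  rcases lt_or_ge s 0 with hneg | hpos
  · have hk : s = -(((-s).toNat : Nat) : Int) := by omega
    rw [hk, PySem.List.pyGetD_neg_natCast xs _ d (by omega) (by omega)]
    rw [List.getD_eq_getElem _ d (by unfold pvKey; split <;> omega)]
    congr 1
    unfold pvKey; split <;> omega
  · rw [PySem.List.pyGetD_eq_getElem xs d hpos (by omega)]
    rw [List.getD_eq_getElem _ d (by unfold pvKey; split <;> omega)]
    congr 1
    unfold pvKey; split <;> omega

theorem pvSetD_key {α : Type} {xs : List α} {s : Int} (v : α) (hlen : xs.length = 256)
    (h1 : -256 ≤ s) (h2 : s < 256) : PySem.List.pySetD xs s v = xs.set (pvKey s) v := by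
  rcases lt_or_ge s 0 with hneg | hpos
  · simp only [PySem.List.pySetD, PySem.List.pySet?, PySem.List.pyIdx?]
    split_ifs <;> simp_all <;> first | omega | (congr 1; unfold pvKey; split <;> omega)
  · rw [PySem.List.pySetD_of_nonneg xs v hpos]
    congr 1
    unfold pvKey; split <;> omega

theorem pvCountP_split {β : Type} (l : List β) (g : β → Nat) (k : Nat) :
    l.countP (fun x => g x < k + 1) = l.countP (fun x => g x < k) + l.countP (fun x => g x = k) := by
  induction l with
  | nil => simp
  | cons a t ih =>
    simp only [List.countP_cons, ih]
    by_cases h1 : g a < k <;> by_cases h2 : g a = k <;>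
      simp [h1, h2, show (g a < k + 1) ↔ (g a < k ∨ g a = k) from by omega] <;> omega

theorem pvOff_zero (S : List Int) : pvOff S 0 = 0 := by
  simp [pvOff]

theorem pvOff_succ (S : List Int) (k : Nat) :
    pvOff S (k + 1) = pvOff S k + pvCnt S S.length k := by
  exact pvCountP_split (List.range S.length) (pvKAt S) k

theorem pvOff_mono (S : List Int) {k k' : Nat} (h : k ≤ k') : pvOff S k ≤ pvOff S k' := by
  apply List.countP_mono_left
  intro i _ hb
  simp only [decide_eq_true_eq] at *
  omega

theorem pvOff_top {S : List Int} (hPre : Pre_counting_sort_arg S) : pvOff S 256 = S.length := by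
  have : (List.range S.length).countP (fun i => pvKAt S i < 256) = (List.range S.length).length := by
    apply List.countP_eq_length.mpr
    intro i hi
    simp only [List.mem_range] at hi
    simp only [decide_eq_true_eq]
    exact pvKAt_lt hPre hi
  simpa [pvOff] using this

theorem pvCnt_mono (S : List Int) (k : Nat) {m m' : Nat} (h : m ≤ m') : pvCnt S m k ≤ pvCnt S m' k := by
  unfold pvCnt
  obtain ⟨d, rfl⟩ := Nat.exists_eq_add_of_le h
  rw [List.range_add, List.countP_append]
  omega

theorem pvCnt_succ (S : List Int) (m k : Nat) :
    pvCnt S (m + 1) k = pvCnt S m k + (if pvKAt S m = k then 1 else 0) := by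
  unfold pvCnt
  rw [List.range_succ, List.countP_append]
  simp [List.countP_cons]

theorem pvGrp_succ (S : List Int) (m k : Nat) :
    pvGrp S (m + 1) k = pvGrp S m k ++ (if pvKAt S m = k then [(m : Int)] else []) := by
  unfold pvGrp
  rw [List.range_succ, List.filter_append, List.map_append]
  congr 1
  by_cases h : pvKAt S m = k <;> simp [h]

theorem pvLen_grp (S : List Int) (m k : Nat) : (pvGrp S m k).length = pvCnt S m k := by
  simp [pvGrp, pvCnt, List.countP_eq_length_filter]

theorem pvMap_getD_range {α : Type} (S : List α) (d : α) :
    (List.range S.length).map (fun i => S.getD i d) = S := by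
  induction S with
  | nil => simp
  | cons a t ih =>
    simp only [List.length_cons, List.range_succ_eq_map, List.map_cons, List.map_map]
    refine congrArg (a :: ·) ?_
    simpa [Function.comp] using ih

theorem pvCnt_eq_countS (S : List Int) (k : Nat) :
    pvCnt S S.length k = S.countP (fun s => pvKey s = k) := by
  conv_rhs => rw [← pvMap_getD_range S 0]
  rw [List.countP_map]
  rfl

theorem pvOff_add_cnt_le {S : List Int} (hPre : Pre_counting_sort_arg S) {k : Nat} (hk : k < 256) :
    pvOff S k + pvCnt S S.length k ≤ S.length := by
  rw [← pvOff_succ]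
  calc pvOff S (k + 1) ≤ pvOff S 256 := pvOff_mono S (by omega)
    _ = S.length := pvOff_top hPre

-- loop 1: the count table
theorem pvLoop1 (l : List Int) : ∀ (T : List Int), T.length = 256 → (∀ s ∈ l, -256 ≤ s ∧ s < 256) →
    (l.foldl (fun T s => PySem.List.pySetD T s (PySem.List.pyGetD T s 0 + 1)) T).length = 256 ∧
    ∀ t < 256, (l.foldl (fun T s => PySem.List.pySetD T s (PySem.List.pyGetD T s 0 + 1)) T).getD t 0
      = T.getD t 0 + (l.countP (fun s => pvKey s = t) : Int) := by
  induction l with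
  | nil => intro T hT _; simp [hT]
  | cons a tl ih =>
    intro T hT hs
    have ha := hs a (by simp)
    have hstep : PySem.List.pySetD T a (PySem.List.pyGetD T a 0 + 1)
        = T.set (pvKey a) (T.getD (pvKey a) 0 + 1) := by
      rw [pvSetD_key _ hT ha.1 ha.2, pvGetD_key _ hT ha.1 ha.2]
    have hlen : (T.set (pvKey a) (T.getD (pvKey a) 0 + 1)).length = 256 := by
      simp [hT]
    obtain ⟨ihl, ihv⟩ := ih (T.set (pvKey a) (T.getD (pvKey a) 0 + 1)) hlen
      (fun s hs' => hs s (List.mem_cons_of_mem _ hs'))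
    refine ⟨by simpa [hstep] using ihl, ?_⟩
    intro t ht
    rw [List.foldl_cons, hstep, ihv t ht, List.countP_cons]
    by_cases h : pvKey a = t
    · rw [h, pvGetD_set_self _ _ (by rw [hT]; omega)]
      simp
      ring
    · rw [pvGetD_set_ne _ _ h]
      simp [h]

theorem pvLoop2 (S : List Int) (T : List Int) (_hT : T.length = 256)
    (hTv : ∀ t < 256, T.getD t 0 = (pvCnt S S.length t : Int)) :
    ∀ n ≤ 255,
    ((List.range n).foldl (fun (Tsub : List Int) (k : Nat) =>
        PySem.List.pySetD Tsub (1 + (k : Int))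
          (PySem.List.pyGetD Tsub ((1 + (k : Int)) - 1) 0 + PySem.List.pyGetD T ((1 + (k : Int)) - 1) 0))
      ((List.range 256).map (fun _ => (0 : Int)))).length = 256 ∧
    ∀ j < 256, ((List.range n).foldl (fun (Tsub : List Int) (k : Nat) =>
        PySem.List.pySetD Tsub (1 + (k : Int))
          (PySem.List.pyGetD Tsub ((1 + (k : Int)) - 1) 0 + PySem.List.pyGetD T ((1 + (k : Int)) - 1) 0))
      ((List.range 256).map (fun _ => (0 : Int)))).getD j 0 = if j ≤ n then (pvOff S j : Int) else 0 := by
  intro n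
  induction n with
  | zero =>
    intro _
    simp only [List.range_zero, List.foldl_nil]
    constructor
    · rw [List.length_map, List.length_range]
    · intro j hj
      rw [pvInit_getD 256 j 0 0, if_pos hj]
      by_cases h : j = 0
      · simp [h, pvOff_zero]
      · simp [show ¬ (j ≤ 0) from by omega]
  | succ n ih =>
    intro hn
    obtain ⟨ihl, ihv⟩ := ih (by omega)
    rw [show List.range (n+1) = List.range n ++ [n] from List.range_succ, List.foldl_append, List.foldl_cons, List.foldl_nil]
    have harg : (1 + (n : Int)) - 1 = ((n : Nat) : Int) := by ring
    have hidx : (1 + (n : Int)) = (((n + 1 : Nat)) : Int) := by push_cast; ring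
    rw [harg, hidx, PySem.List.pySetD_natCast, PySem.List.pyGetD_natCast, PySem.List.pyGetD_natCast]
    have hTn := hTv n (by omega)
    have hrn := ihv n (by omega)
    rw [if_pos (le_refl n)] at hrn
    constructor
    · rw [List.length_set]; exact ihl
    · intro j hj
      by_cases h : j = n + 1
      · subst h
        rw [pvGetD_set_self _ _ (by omega), hrn, hTn, if_pos (le_refl _), pvOff_succ]
        push_cast; ring
      · rw [pvGetD_set_ne _ _ (fun hh => h hh.symm), ihv j hj]
        by_cases h2 : j ≤ n
        · rw [if_pos h2, if_pos (by omega)]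
        · rw [if_neg h2, if_neg (by omega)]

theorem pvLoop3 (S : List Int) (hPre : Pre_counting_sort_arg S)
    (Tsub0 : List Int) (hTs : Tsub0.length = 256)
    (hTv : ∀ k < 256, Tsub0.getD k 0 = (pvOff S k : Int)) (P0 : List Int) :
    ∀ m ≤ S.length,
    (((List.range m).foldl (fun (st : List Int × List Int × List Int) (k : Nat) =>
        let Pinv := st.1
        let P := st.2.1
        let Tsub := st.2.2
        let s := PySem.List.pyGetD S (k : Int) 0
        let Pinv' := PySem.List.pySetD Pinv (PySem.List.pyGetD Tsub s 0) (k : Int)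
        let P' := PySem.List.pySetD P (k : Int) (PySem.List.pyGetD Tsub s 0)
        let Tsub' := PySem.List.pySetD Tsub s (PySem.List.pyGetD Tsub s 0 + 1)
        (Pinv', P', Tsub'))
      ((List.range S.length).map (fun _ => (-1 : Int)), P0, Tsub0)).1.length = S.length ∧
    ((List.range m).foldl (fun (st : List Int × List Int × List Int) (k : Nat) =>
        let Pinv := st.1
        let P := st.2.1
        let Tsub := st.2.2
        let s := PySem.List.pyGetD S (k : Int) 0
        let Pinv' := PySem.List.pySetD Pinv (PySem.List.pyGetD Tsub s 0) (k : Int)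
        let P' := PySem.List.pySetD P (k : Int) (PySem.List.pyGetD Tsub s 0)
        let Tsub' := PySem.List.pySetD Tsub s (PySem.List.pyGetD Tsub s 0 + 1)
        (Pinv', P', Tsub'))
      ((List.range S.length).map (fun _ => (-1 : Int)), P0, Tsub0)).2.2.length = 256 ∧
    (∀ k < 256, ((List.range m).foldl (fun (st : List Int × List Int × List Int) (k : Nat) =>
        let Pinv := st.1
        let P := st.2.1
        let Tsub := st.2.2
        let s := PySem.List.pyGetD S (k : Int) 0
        let Pinv' := PySem.List.pySetD Pinv (PySem.List.pyGetD Tsub s 0) (k : Int)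
        let P' := PySem.List.pySetD P (k : Int) (PySem.List.pyGetD Tsub s 0)
        let Tsub' := PySem.List.pySetD Tsub s (PySem.List.pyGetD Tsub s 0 + 1)
        (Pinv', P', Tsub'))
      ((List.range S.length).map (fun _ => (-1 : Int)), P0, Tsub0)).2.2.getD k 0
        = ((pvOff S k + pvCnt S m k : Nat) : Int)) ∧
    (∀ k < 256, ∀ r < pvCnt S m k, ((List.range m).foldl (fun (st : List Int × List Int × List Int) (k : Nat) =>
        let Pinv := st.1
        let P := st.2.1
        let Tsub := st.2.2
        let s := PySem.List.pyGetD S (k : Int) 0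
        let Pinv' := PySem.List.pySetD Pinv (PySem.List.pyGetD Tsub s 0) (k : Int)
        let P' := PySem.List.pySetD P (k : Int) (PySem.List.pyGetD Tsub s 0)
        let Tsub' := PySem.List.pySetD Tsub s (PySem.List.pyGetD Tsub s 0 + 1)
        (Pinv', P', Tsub'))
      ((List.range S.length).map (fun _ => (-1 : Int)), P0, Tsub0)).1.getD (pvOff S k + r) 0
        = (pvGrp S m k).getD r 0)) := by
  intro m
  induction m with
  | zero =>
    intro _
    simp only [List.range_zero, List.foldl_nil]
    refine ⟨by rw [List.length_map, List.length_range], hTs, ?_, ?_⟩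
    · intro k hk
      have : pvCnt S 0 k = 0 := by simp [pvCnt]
      rw [this, Nat.add_zero]
      exact hTv k hk
    · intro k hk r hr
      simp [pvCnt] at hr
  | succ m ih =>
    intro hm
    obtain ⟨ihP, ihT, ihTv, ihPv⟩ := ih (by omega)
    rw [show List.range (m+1) = List.range m ++ [m] from List.range_succ,
        List.foldl_append, List.foldl_cons, List.foldl_nil]
    set st := ((List.range m).foldl (fun (st : List Int × List Int × List Int) (k : Nat) =>
        let Pinv := st.1
        let P := st.2.1
        let Tsub := st.2.2
        let s := PySem.List.pyGetD S (k : Int) 0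
        let Pinv' := PySem.List.pySetD Pinv (PySem.List.pyGetD Tsub s 0) (k : Int)
        let P' := PySem.List.pySetD P (k : Int) (PySem.List.pyGetD Tsub s 0)
        let Tsub' := PySem.List.pySetD Tsub s (PySem.List.pyGetD Tsub s 0 + 1)
        (Pinv', P', Tsub'))
      ((List.range S.length).map (fun _ => (-1 : Int)), P0, Tsub0)) with hst
    dsimp only
    -- facts about this step
    have hs := pvSmem hPre (show m < S.length by omega)
    have hk0 : pvKAt S m < 256 := pvKAt_lt hPre (by omega)
    set k0 := pvKAt S m with hk0def
    have hgetS : PySem.List.pyGetD S ((m : Nat) : Int) 0 = S.getD m 0 := PySem.List.pyGetD_natCast S m 0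
    rw [hgetS, pvSetD_key _ ihT hs.1 hs.2, pvGetD_key _ ihT hs.1 hs.2]
    rw [show pvKey (S.getD m 0) = k0 from rfl]
    have hq : st.2.2.getD k0 0 = ((pvOff S k0 + pvCnt S m k0 : Nat) : Int) := ihTv k0 hk0
    rw [hq, PySem.List.pySetD_natCast]
    -- bounds
    have hcnt1 : pvCnt S (m+1) k0 = pvCnt S m k0 + 1 := by
      rw [pvCnt_succ, if_pos rfl]
    have hcle : pvCnt S (m+1) k0 ≤ pvCnt S S.length k0 := pvCnt_mono S k0 (by omega)
    have hoffle : pvOff S k0 + pvCnt S S.length k0 ≤ S.length := pvOff_add_cnt_le hPre hk0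
    have hpos : pvOff S k0 + pvCnt S m k0 < S.length := by omega
    refine ⟨?_, ?_, ?_, ?_⟩
    · rw [List.length_set]; exact ihP
    · rw [List.length_set]; exact ihT
    · intro k hk
      by_cases h : k = k0
      · subst h
        rw [pvGetD_set_self _ _ (by omega), hcnt1]
        push_cast; ring
      · rw [pvGetD_set_ne _ _ (fun hh => h hh.symm), ihTv k hk, pvCnt_succ,
            if_neg (fun hh => h hh.symm), Nat.add_zero]
    · intro k hk r hr
      rw [pvGrp_succ]
      by_cases h : k = k0
      · subst h
        rw [if_pos rfl]
        rw [hcnt1] at hr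
        rcases Nat.lt_succ_iff_lt_or_eq.mp hr with hlt | heq
        · rw [pvGetD_set_ne _ _ (by omega), pvGetD_append_left _ (by rw [pvLen_grp]; omega)]
          exact ihPv k0 hk0 r hlt
        · subst heq
          rw [pvGetD_set_self _ _ (by omega)]
          have := pvGetD_append_right (l1 := pvGrp S m k0) (l2 := [(m : Int)]) 0 (0 : Int)
          rw [pvLen_grp] at this
          rw [Nat.add_zero] at this
          rw [this]
          rfl
      · have hne : pvOff S k + r ≠ pvOff S k0 + pvCnt S m k0 := by
          have hrK : pvCnt S (m+1) k = pvCnt S m k := by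
            rw [pvCnt_succ, if_neg (fun hh => h hh.symm), Nat.add_zero]
          have hrK' : r < pvCnt S S.length k := by
            have := pvCnt_mono S k (show m + 1 ≤ S.length by omega)
            omega
          rcases Nat.lt_or_ge k k0 with hlt | hge
          · have h1 : pvOff S (k+1) ≤ pvOff S k0 := pvOff_mono S (by omega)
            rw [pvOff_succ] at h1
            omega
          · have hgt : k0 < k := by omega
            have h1 : pvOff S (k0+1) ≤ pvOff S k := pvOff_mono S (by omega)
            rw [pvOff_succ] at h1
            omega
        rw [pvGetD_set_ne _ _ (fun hh => hne hh.symm), if_neg (fun hh => h hh.symm), List.append_nil]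
        have hrK : pvCnt S (m+1) k = pvCnt S m k := by
          rw [pvCnt_succ, if_neg (fun hh => h hh.symm), Nat.add_zero]
        exact ihPv k hk r (by omega)

theorem pvLoopB (S : List Int) (hPre : Pre_counting_sort_arg S) :
    ∀ m ≤ S.length,
    ((List.range m).foldl (fun (b : List (List Int)) (k : Nat) =>
        let s := PySem.List.pyGetD S (k : Int) 0
        PySem.List.pySetD b s (PySem.List.pyGetD b s [] ++ [(k : Int)]))
      ((List.range 256).map (fun _ => ([] : List Int)))).length = 256 ∧
    ∀ k < 256, ((List.range m).foldl (fun (b : List (List Int)) (k : Nat) =>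
        let s := PySem.List.pyGetD S (k : Int) 0
        PySem.List.pySetD b s (PySem.List.pyGetD b s [] ++ [(k : Int)]))
      ((List.range 256).map (fun _ => ([] : List Int)))).getD k [] = pvGrp S m k := by
  intro m
  induction m with
  | zero =>
    intro _
    simp only [List.range_zero, List.foldl_nil]
    constructor
    · rw [List.length_map, List.length_range]
    · intro k hk
      rw [pvInit_getD 256 k ([] : List Int) [], if_pos hk]
      simp [pvGrp]
  | succ m ih =>
    intro hm
    obtain ⟨ihl, ihv⟩ := ih (by omega)
    rw [show List.range (m+1) = List.range m ++ [m] from List.range_succ,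
        List.foldl_append, List.foldl_cons, List.foldl_nil]
    simp only []
    have hs := pvSmem hPre (show m < S.length by omega)
    have hget : PySem.List.pyGetD S ((m : Nat) : Int) 0 = S.getD m 0 := by
      rw [PySem.List.pyGetD_natCast]
    rw [hget, pvSetD_key _ ihl hs.1 hs.2, pvGetD_key _ ihl hs.1 hs.2]
    constructor
    · rw [List.length_set]; exact ihl
    · intro k hk
      rw [pvGrp_succ]
      by_cases h : pvKey (S.getD m 0) = k
      · rw [h, pvGetD_set_self _ _ (by omega), ihv k hk]
        have : pvKAt S m = k := h
        rw [if_pos this]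
      · rw [pvGetD_set_ne _ _ h, ihv k hk]
        have : ¬ (pvKAt S m = k) := h
        rw [if_neg this, List.append_nil]

theorem pvFoldl_append {α : Type} (bs : List (List α)) (acc : List α) :
    bs.foldl (fun res bk => res ++ bk) acc = acc ++ bs.flatten := by
  induction bs generalizing acc with
  | nil => simp
  | cons b t ih => simp [ih, List.append_assoc]

theorem pvBJ_succ (S : List Int) (m : Nat) : pvBJ S (m + 1) = pvBJ S m ++ pvGrp S S.length m := by
  simp [pvBJ, List.range_succ]

theorem pvLen_BJ (S : List Int) (m : Nat) : (pvBJ S m).length = pvOff S m := by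
  induction m with
  | zero => simp [pvBJ, pvOff_zero]
  | succ m ih => rw [pvBJ_succ, List.length_append, ih, pvLen_grp, pvOff_succ]

theorem pvGet_BJ (S : List Int) : ∀ m, ∀ k < m, ∀ r < pvCnt S S.length k,
    (pvBJ S m).getD (pvOff S k + r) 0 = (pvGrp S S.length k).getD r 0 := by
  intro m
  induction m with
  | zero => intro k hk; omega
  | succ m ih =>
    intro k hk r hr
    rw [pvBJ_succ]
    by_cases h : k < m
    · have hb : pvOff S k + r < (pvBJ S m).length := by
        rw [pvLen_BJ]
        have h1 : pvOff S (k + 1) ≤ pvOff S m := pvOff_mono S (by omega)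
        rw [pvOff_succ] at h1
        omega
      rw [pvGetD_append_left _ hb]
      exact ih k h r hr
    · have hk' : k = m := by omega
      subst hk'
      have := pvGetD_append_right (l1 := pvBJ S k) (l2 := pvGrp S S.length k) r (0 : Int)
      rw [pvLen_BJ] at this
      exact this

theorem pvCover (S : List Int) : ∀ m, ∀ p, p < pvOff S m →
    ∃ k, k < m ∧ pvOff S k ≤ p ∧ p < pvOff S k + pvCnt S S.length k := by
  intro m
  induction m with
  | zero => intro p hp; rw [pvOff_zero] at hp; omega
  | succ m ih =>
    intro p hp
    by_cases h : p < pvOff S m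
    · obtain ⟨k, hk, h1, h2⟩ := ih p h
      exact ⟨k, by omega, h1, h2⟩
    · exact ⟨m, by omega, by omega, by rw [← pvOff_succ]; exact hp⟩

-- the two ports, reshaped to plain range folds
theorem pvRange0 (n : Nat) : PySem.List.pyRange 0 (n : Int) 1 = (List.range n).map (fun k : Nat => (k : Int)) := by
  rw [PySem.List.pyRange_one]
  simp only [Int.sub_zero, Int.toNat_natCast]
  exact List.map_congr_left (fun k _ => by simp)

theorem pvRangeM : PySem.List.pyRange 1 ((256 : Nat) : Int) 1 = (List.range 255).map (fun k : Nat => 1 + (k : Int)) := by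
  rw [PySem.List.pyRange_one]
  simp only [Nat.cast_ofNat, show ((256:Int) - 1).toNat = 255 from by decide]

theorem pvPortA_eq (S : List Int) (hPre : Pre_counting_sort_arg S) :
    counting_sort_arg S = pvBJ S 256 := by
  obtain ⟨hT1len, hT1v⟩ := pvLoop1 S ((List.range 256).map (fun _ => (0 : Int)))
    (by rw [List.length_map, List.length_range]) hPre
  have hTv : ∀ t < 256, (S.foldl (fun T s => PySem.List.pySetD T s (PySem.List.pyGetD T s 0 + 1))
      ((List.range 256).map (fun _ => (0 : Int)))).getD t 0 = (pvCnt S S.length t : Int) := by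
    intro t ht
    rw [hT1v t ht, pvInit_getD, if_pos ht, pvCnt_eq_countS, zero_add]
  obtain ⟨hT2len, hT2v⟩ := pvLoop2 S _ hT1len hTv 255 (le_refl _)
  have hTsv : ∀ j < 256, ((List.range 255).foldl (fun (Tsub : List Int) (k : Nat) =>
        PySem.List.pySetD Tsub (1 + (k : Int))
          (PySem.List.pyGetD Tsub ((1 + (k : Int)) - 1) 0
            + PySem.List.pyGetD (S.foldl (fun T s => PySem.List.pySetD T s (PySem.List.pyGetD T s 0 + 1))
                ((List.range 256).map (fun _ => (0 : Int)))) ((1 + (k : Int)) - 1) 0))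
      ((List.range 256).map (fun _ => (0 : Int)))).getD j 0 = (pvOff S j : Int) := by
    intro j hj
    rw [hT2v j hj, if_pos (by omega)]
  obtain ⟨hPlen, -, -, hPv⟩ := pvLoop3 S hPre _ hT2len hTsv
    ((List.range S.length).map (fun _ => (-1 : Int))) S.length (le_refl _)
  simp only [counting_sort_arg]
  rw [pvRangeM, pvRange0 S.length, List.foldl_map, List.foldl_map]
  apply List.ext_getElem
  · rw [pvLen_BJ, pvOff_top hPre]
    exact hPlen
  · intro p h1 h2
    rw [pvLen_BJ, pvOff_top hPre] at h2
    obtain ⟨k, hk, hlo, hhi⟩ := pvCover S 256 p (by rw [pvOff_top hPre]; exact h2)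
    rw [← List.getD_eq_getElem _ (0 : Int) h1, ← List.getD_eq_getElem _ (0 : Int)]
    have hA := hPv k hk (p - pvOff S k) (by omega)
    rw [show pvOff S k + (p - pvOff S k) = p from by omega] at hA
    have hB := pvGet_BJ S 256 k hk (p - pvOff S k) (by omega)
    rw [show pvOff S k + (p - pvOff S k) = p from by omega] at hB
    exact hA.trans hB.symm

theorem pvPortB_eq (S : List Int) (hPre : Pre_counting_sort_arg S) :
    counting_sort_arg_alt S = pvBJ S 256 := by
  obtain ⟨hlen, hval⟩ := pvLoopB S hPre S.length (le_refl _)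
  have hb : (List.range S.length).foldl (fun (b : List (List Int)) (k : Nat) =>
        let s := PySem.List.pyGetD S (k : Int) 0
        PySem.List.pySetD b s (PySem.List.pyGetD b s [] ++ [(k : Int)]))
      ((List.range 256).map (fun _ => ([] : List Int)))
      = (List.range 256).map (fun k => pvGrp S S.length k) := by
    apply List.ext_getElem
    · rw [hlen, List.length_map, List.length_range]
    · intro k h1 h2
      have hk : k < 256 := by rw [hlen] at h1; exact h1
      have hv := hval k hk
      rw [List.getD_eq_getElem _ _ h1] at hv
      rw [hv, List.getElem_map, List.getElem_range]
  simp only [counting_sort_arg_alt]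
  rw [pvRange0 S.length, List.foldl_map]
  show ((List.range S.length).foldl (fun (b : List (List Int)) (k : Nat) =>
        let s := PySem.List.pyGetD S (k : Int) 0
        PySem.List.pySetD b s (PySem.List.pyGetD b s [] ++ [(k : Int)]))
      ((List.range 256).map (fun _ => ([] : List Int)))).foldl (fun res bk => res ++ bk) [] = pvBJ S 256
  rw [hb, pvFoldl_append, List.nil_append]
  rfl

-- ===== VERDICT (by name: the statement is the Claim_ definition above) =====
theorem counting_sort_arg_spec : Claim_equal_counting_sort_arg := by
  intro S _ hPre
  unfold Spec_counting_sort_arg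
  rw [pvPortA_eq S hPre, pvPortB_eq S hPre]
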